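-- pv_equiv track=rewrite | github.com/supfisher/AirDL | demos/analyzers/minist.py | process_acc_energy
-- ===== SOURCE A (Python) =====
-- def process_acc_energy(energy, acc):
--     energy_list = []
--     acc_list = []
--     for e, a in zip(energy, acc):
--         set_e = sorted(list(set(e)))
--         a = [a[e.index(v)] for v in set_e]
--         e = list(set_e)
--         energy_list.append(e)
--         acc_list.append(a)
--     return energy_list, acc_list
-- ===== SOURCE B (Python) =====
-- def process_acc_energy(energy, acc):
--     energy_list = []
--     acc_list = []
--     for e, a in zip(energy, acc):
--         pairs = list(enumerate(e))
--         es, as_ = [], []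
--         while pairs:
--             # find the minimum remaining energy value
--             m = pairs[0][1]
--             for _, v in pairs:
--                 if v < m:
--                     m = v
--             # accuracy at the first (original) index carrying that value
--             for i, v in pairs:
--                 if v == m:
--                     as_.append(a[i])
--                     break
--             es.append(m)
--             # drop every pair carrying the emitted value
--             pairs = [q for q in pairs if q[1] != m]
--         energy_list.append(es)
--         acc_list.append(as_)
--     return energy_list, acc_list
-- ===== Notes on version B (the rewrite author's own statement) =====
-- stated objective: alternative
-- what changed: Replaces set+sorted plus per-value e.index() rescans by repeated minimum extraction: a while loop that scans the remaining (index, value) pairs for the minimum value, emits it with the accuracy at its first original index, and filters out all pairs with that value -- no set, no sort call, no .index.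
import Mathlib
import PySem

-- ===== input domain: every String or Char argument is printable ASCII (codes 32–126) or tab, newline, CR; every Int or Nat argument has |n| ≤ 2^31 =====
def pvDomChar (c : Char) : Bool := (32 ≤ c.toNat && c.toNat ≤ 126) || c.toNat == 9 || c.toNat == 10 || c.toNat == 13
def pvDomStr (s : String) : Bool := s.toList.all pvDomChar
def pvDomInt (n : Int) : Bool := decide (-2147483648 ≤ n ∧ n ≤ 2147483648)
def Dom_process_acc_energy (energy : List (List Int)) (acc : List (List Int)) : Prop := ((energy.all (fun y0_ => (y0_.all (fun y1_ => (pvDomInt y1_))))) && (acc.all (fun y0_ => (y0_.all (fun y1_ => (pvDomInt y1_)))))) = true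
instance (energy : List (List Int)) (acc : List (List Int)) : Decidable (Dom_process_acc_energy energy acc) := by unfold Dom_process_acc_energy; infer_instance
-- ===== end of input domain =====

-- B replaces A's set+sorted+per-value e.index() rescans by repeated minimum extraction over
-- (index, value) pairs (objective: alternative algorithm, same asymptotic cost).

-- ===== PORT A =====
-- per-pair body of A's loop: set_e = sorted(set(e)); a' = [a[e.index(v)] for v in set_e]
def pvAPair (e : List Int) (a : List Int) : List Int × List Int :=
  ((PySem.List.sorted (PySem.Set.ofList e) (fun x => x) false),
   (PySem.List.sorted (PySem.Set.ofList e) (fun x => x) false).map (fun v =>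
     PySem.List.pyGetD a (((PySem.List.index? e v).getD 0 : Nat) : Int) 0))  -- a[e.index(v)]; out-of-range excluded by Pre_

def process_acc_energy (energy : List (List Int)) (acc : List (List Int)) : List (List Int) × List (List Int) :=
  (List.zip energy acc).foldl
    (fun st p => (st.1 ++ [(pvAPair p.1 p.2).1], st.2 ++ [(pvAPair p.1 p.2).2]))
    ([], [])

-- ===== PORT B =====
-- the inner 'for _, v in pairs: if v < m: m = v' scan
def pvMin (x : Int) (ps : List (Int × Int)) : Int :=
  ps.foldl (fun m q => if q.2 < m then q.2 else m) x

-- helper for pvSelLoop termination: the minimum value is attained by some pair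
theorem pvMin_self_or_mem (x : Int) (ps : List (Int × Int)) :
    pvMin x ps = x ∨ pvMin x ps ∈ ps.map (·.2) := by
  induction ps generalizing x with
  | nil => exact Or.inl rfl
  | cons q t ih =>
      unfold pvMin at *
      simp only [List.foldl_cons, List.map_cons, List.mem_cons]
      by_cases h : q.2 < x
      · rw [if_pos h]
        rcases ih q.2 with h' | h'
        · exact Or.inr (Or.inl h')
        · exact Or.inr (Or.inr h')
      · rw [if_neg h]
        rcases ih x with h' | h'
        · exact Or.inl h'
        · exact Or.inr (Or.inr h')

theorem pvSel_dec (p : Int × Int) (t : List (Int × Int)) :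
    ((p :: t).filter (fun q => !(q.2 == pvMin p.2 (p :: t)))).length < (p :: t).length := by
  apply List.length_filter_lt_length_iff_exists.mpr
  rcases pvMin_self_or_mem p.2 (p :: t) with h | h
  · exact ⟨p, List.mem_cons_self, by simp [h]⟩
  · rcases List.mem_map.mp h with ⟨q, hq, hv⟩
    exact ⟨q, hq, by simp [hv]⟩

-- the while loop: extract min value, record acc at its first original index, drop its pairs
def pvSelLoop (a : List Int) (ps : List (Int × Int)) (es as_ : List Int) : List Int × List Int :=
  match ps with
  | [] => (es, as_)
  | p :: t =>
      let m := pvMin p.2 (p :: t)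
      let i := (((p :: t).find? (fun q => q.2 == m)).getD (0, 0)).1   -- break on first hit
      pvSelLoop a ((p :: t).filter (fun q => !(q.2 == m)))
        (es ++ [m]) (as_ ++ [PySem.List.pyGetD a i 0])
  termination_by ps.length
  decreasing_by exact pvSel_dec p t

def pvBPair (e : List Int) (a : List Int) : List Int × List Int :=
  pvSelLoop a (PySem.List.enumerate e) [] []

def process_acc_energy_alt (energy : List (List Int)) (acc : List (List Int)) : List (List Int) × List (List Int) :=
  (List.zip energy acc).foldl
    (fun st p => (st.1 ++ [(pvBPair p.1 p.2).1], st.2 ++ [(pvBPair p.1 p.2).2]))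
    ([], [])

-- ===== PRECONDITION & SPEC =====
-- Pre_ excludes exactly the inputs on which Python A raises IndexError: some first-occurrence
-- index e.index(v) falls outside the paired acc sublist.
def Pre_process_acc_energy (energy : List (List Int)) (acc : List (List Int)) : Prop :=
  ∀ p ∈ List.zip energy acc, ∀ v ∈ p.1, p.1.idxOf v < p.2.length
instance (energy : List (List Int)) (acc : List (List Int)) : Decidable (Pre_process_acc_energy energy acc) := by unfold Pre_process_acc_energy; infer_instance

def pvWitness_process_acc_energy : List (List Int) × List (List Int) := ([[2, 1, 2]], [[5, 7, 9]])

def Spec_process_acc_energy (energy : List (List Int)) (acc : List (List Int)) (out : List (List Int) × List (List Int)) : Prop := out = process_acc_energy_alt energy acc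
instance (energy : List (List Int)) (acc : List (List Int)) (out : List (List Int) × List (List Int)) : Decidable (Spec_process_acc_energy energy acc out) := by unfold Spec_process_acc_energy; infer_instance

-- ===== CLAIM (what is proved, stated in full; the proofs are below) =====
def Claim_equal_process_acc_energy : Prop := ∀ (energy : List (List Int)) (acc : List (List Int)), Dom_process_acc_energy energy acc → Pre_process_acc_energy energy acc → Spec_process_acc_energy energy acc (process_acc_energy energy acc)

-- ===== LEMMAS AND PROOFS =====

-- pvMin is the running minimum of the values
theorem pvMin_eq_foldl_min (x : Int) (ps : List (Int × Int)) :
    pvMin x ps = (ps.map (·.2)).foldl min x := by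
  induction ps generalizing x with
  | nil => rfl
  | cons q t ih =>
      unfold pvMin at *
      simp only [List.foldl_cons, List.map_cons]
      rw [ih]
      congr 1
      by_cases h : q.2 < x
      · rw [if_pos h]; omega
      · rw [if_neg h]; omega

-- values of the P-filtered enumerate are the P-filtered values
theorem pv_map_snd_filter (e : List Int) (s : Int) (P : Int → Bool) :
    (((PySem.List.enumerate e s).filter (fun q => P q.2)).map (·.2)) = e.filter P := by
  induction e generalizing s with
  | nil => simp [PySem.List.enumerate_nil]
  | cons x e ih =>
      rw [PySem.List.enumerate_cons]
      by_cases h : P x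
      · simp [h, ih]
      · simp [h, ih]

-- the first pair of the filtered enumerate carrying value m sits at e's first index of m
theorem pv_find_filtered (P : Int → Bool) (m : Int) (hP : P m = true) :
    ∀ (e : List Int) (s : Int), m ∈ e →
      ((PySem.List.enumerate e s).filter (fun q => P q.2)).find? (fun q => q.2 == m)
        = some (s + (e.idxOf m : Int), m) := by
  intro e
  induction e with
  | nil => intro s h; simp at h
  | cons x e ih =>
      intro s hm
      rw [PySem.List.enumerate_cons]
      by_cases hx : x = m
      · subst hx
        simp [hP, List.idxOf_cons_self]
      · have hm' : m ∈ e := by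
          rcases List.mem_cons.mp hm with h | h
          · exact absurd h.symm hx
          · exact h
        have hidx : (x :: e).idxOf m = e.idxOf m + 1 := List.idxOf_cons_ne e hx
        by_cases h : P x
        · rw [List.filter_cons, if_pos (by simpa using h)]
          rw [List.find?_cons_of_neg (by simp [hx]), ih (s+1) hm', hidx]
          congr 1
          push_cast
          ring_nf
        · rw [List.filter_cons, if_neg (by simpa using h), ih (s+1) hm', hidx]
          congr 1
          push_cast
          ring_nf

-- sorted(set(l)) starts with the minimum, then sorted(set(l minus that value))
theorem pv_sorted_set_cons (l : List Int) (m : Int) (hm : m ∈ l) (hmin : ∀ v ∈ l, m ≤ v) :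
    PySem.List.sorted (PySem.Set.ofList l) (fun x => x) false
      = m :: PySem.List.sorted (PySem.Set.ofList (l.filter (fun v => !(v == m)))) (fun x => x) false := by
  have htail_mem : ∀ v, v ∈ PySem.List.sorted (PySem.Set.ofList (l.filter (fun v => !(v == m)))) (fun x => x) false ↔ (v ∈ l ∧ v ≠ m) := by
    intro v
    rw [PySem.List.mem_sorted, PySem.Set.mem_ofList, List.mem_filter]
    simp
  apply PySem.List.sorted_eq_of_perm_of_pairwise_lt
  · apply (List.perm_ext_iff_of_nodup ?_ ?_).mpr
    · intro v
      rw [List.mem_cons, htail_mem v, PySem.Set.mem_ofList]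
      constructor
      · rintro (rfl | ⟨h, _⟩) <;> assumption
      · intro hv
        by_cases h : v = m
        · exact Or.inl h
        · exact Or.inr ⟨hv, h⟩
    · rw [List.nodup_cons]
      refine ⟨fun h => ((htail_mem m).mp h).2 rfl, ?_⟩
      exact ((PySem.List.sorted_perm _ _ _).nodup_iff).mpr (PySem.Set.nodup_ofList _)
    · exact PySem.Set.nodup_ofList _
  · constructor
    · intro v hv
      rcases (htail_mem v).mp hv with ⟨hvl, hne⟩
      exact lt_of_le_of_ne (hmin v hvl) (Ne.symm hne)
    · exact PySem.List.sorted_ofList_pairwise_lt _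

-- loop invariant of pvSelLoop over a value-filtered enumerate
theorem pvSelLoop_eq (n : Nat) :
    ∀ (e a : List Int) (P : Int → Bool) (es as_ : List Int), (e.filter P).length ≤ n →
      pvSelLoop a ((PySem.List.enumerate e).filter (fun q => P q.2)) es as_ =
        (es ++ PySem.List.sorted (PySem.Set.ofList (e.filter P)) (fun x => x) false,
         as_ ++ (PySem.List.sorted (PySem.Set.ofList (e.filter P)) (fun x => x) false).map
           (fun v => PySem.List.pyGetD a ((e.idxOf v : Nat) : Int) 0)) := by
  induction n with
  | zero =>
      intro e a P es as_ hn
      have hfe : e.filter P = [] := List.length_eq_zero_iff.mp (Nat.le_zero.mp hn)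
      have hfil : (PySem.List.enumerate e).filter (fun q => P q.2) = [] := by
        have := pv_map_snd_filter e 0 P
        rw [hfe] at this
        exact List.map_eq_nil_iff.mp this
      rw [hfil, hfe]
      simp [pvSelLoop, PySem.Set.ofList, PySem.List.sorted]
  | succ n ih =>
      intro e a P es as_ hn
      cases hfil : (PySem.List.enumerate e).filter (fun q => P q.2) with
      | nil =>
          have hfe : e.filter P = [] := by
            have := pv_map_snd_filter e 0 P
            rw [hfil] at this
            exact this.symm
          rw [hfe]
          simp [pvSelLoop, PySem.Set.ofList, PySem.List.sorted]
      | cons p t =>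
          have hvals : (p :: t).map (·.2) = e.filter P := by
            rw [← hfil]; exact pv_map_snd_filter e 0 P
          set m := pvMin p.2 (p :: t) with hm
          have hmmap : m ∈ (p :: t).map (·.2) := by
            rcases pvMin_self_or_mem p.2 (p :: t) with h | h
            · rw [hm, h]; exact List.mem_map.mpr ⟨p, List.mem_cons_self, rfl⟩
            · exact h
          have hmem : m ∈ e.filter P := hvals ▸ hmmap
          have hmP : P m = true := (List.mem_filter.mp hmem).2
          have hme : m ∈ e := (List.mem_filter.mp hmem).1
          have hmlist : m = (t.map (·.2)).foldl min p.2 := by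
            rw [hm, pvMin_eq_foldl_min]
            simp [min_self]
          have hfl := PySem.List.foldl_min_le (t.map (·.2)) p.2
          have hminle : ∀ v ∈ e.filter P, m ≤ v := by
            intro v hv
            rw [← hvals, List.map_cons, List.mem_cons] at hv
            rcases hv with rfl | hv'
            · rw [hmlist]; exact hfl.1
            · rw [hmlist]; exact hfl.2 v hv'
          -- the find? gives the first original index of m
          have hfind : (p :: t).find? (fun q => q.2 == m) = some ((0 : Int) + (e.idxOf m : Int), m) := by
            rw [← hfil]
            exact pv_find_filtered P m hmP e 0 hme
          -- the filtered tail is the enumerate filtered by P'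
          have hstep : (p :: t).filter (fun q => !(q.2 == m))
              = (PySem.List.enumerate e).filter (fun q => !(q.2 == m) && P q.2) := by
            rw [← hfil, List.filter_filter]
          have hfe' : e.filter (fun v => !(v == m) && P v) = (e.filter P).filter (fun v => !(v == m)) := by
            rw [List.filter_filter]
          have hlen : (e.filter (fun v => !(v == m) && P v)).length ≤ n := by
            rw [hfe']
            have : ((e.filter P).filter (fun v => !(v == m))).length < (e.filter P).length := by
              apply List.length_filter_lt_length_iff_exists.mpr
              exact ⟨m, hmem, by simp⟩
            omega
          have hsorted : PySem.List.sorted (PySem.Set.ofList (e.filter P)) (fun x => x) false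
              = m :: PySem.List.sorted (PySem.Set.ofList (e.filter (fun v => !(v == m) && P v))) (fun x => x) false := by
            rw [hfe']
            exact pv_sorted_set_cons (e.filter P) m hmem hminle
          rw [pvSelLoop]
          simp only [← hm, hfind, hstep]
          rw [ih e a (fun v => !(v == m) && P v) _ _ hlen, hsorted]
          simp [List.append_assoc]

theorem pvPair_eq (e a : List Int) : pvAPair e a = pvBPair e a := by
  have htrue : (PySem.List.enumerate e).filter (fun q => (fun (_ : Int) => true) q.2) = PySem.List.enumerate e := by
    simp
  have h := pvSelLoop_eq (e.filter (fun _ => true)).length e a (fun _ => true) [] [] le_rfl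
  rw [htrue] at h
  simp only [List.filter_true] at h
  unfold pvAPair pvBPair
  rw [h]
  simp only [List.nil_append]
  refine Prod.ext rfl ?_
  apply List.map_congr_left
  intro v hv
  have hve : v ∈ e := by
    have := (PySem.List.mem_sorted _ _ _ _).mp hv
    simpa [PySem.Set.mem_ofList] using this
  have hidx : PySem.List.index? e v = some (e.idxOf v) := by
    rw [PySem.List.index?_eq_idxOf?]
    cases h' : List.idxOf? v e with
    | none => exact absurd (List.idxOf?_eq_none_iff.mp h') (by simpa using hve)
    | some k => rw [List.idxOf_eq_getD_idxOf?, h']; rfl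
  rw [hidx]
  simp

-- ===== VERDICT (by name: the statement is the Claim_ definition above) =====
theorem process_acc_energy_spec : Claim_equal_process_acc_energy := by
  intro energy acc _ _
  unfold Spec_process_acc_energy process_acc_energy process_acc_energy_alt
  apply PySem.List.foldl_congr_mem
  intro st p _
  rw [pvPair_eq p.1 p.2]
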